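-- pv_equiv track=rewrite | github.com/Nirusu99/practice-rs | py-practice/2020.py | cluster_by_points
-- ===== SOURCE A (Python) =====
-- def cluster_by_points(points: dict[str, int]) -> dict[int, list[str]]:
--     cl: dict[int, list[str]] = {}
--     for (v, k) in points.items():
--         if (k2 := k - (k % 10)) not in cl:
--             cl[k2] = [v]
--         else:
--             cl[k2].append(v)
--     return cl
-- ===== SOURCE B (Python) =====
-- def cluster_by_points(points: dict[str, int]) -> dict[int, list[str]]:
--     clusters = [k - k % 10 for k in points.values()]
--     return {c: [v for v, k in points.items() if k - k % 10 == c]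
--             for c in dict.fromkeys(clusters)}
-- ===== Notes on version B (the rewrite author's own statement) =====
-- stated objective: alternative
-- what changed: Replaced A's single hashed pass that incrementally appends into a dict of lists with a dedup of the cluster values (dict.fromkeys) followed by one filtering comprehension per distinct cluster.
import Mathlib
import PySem

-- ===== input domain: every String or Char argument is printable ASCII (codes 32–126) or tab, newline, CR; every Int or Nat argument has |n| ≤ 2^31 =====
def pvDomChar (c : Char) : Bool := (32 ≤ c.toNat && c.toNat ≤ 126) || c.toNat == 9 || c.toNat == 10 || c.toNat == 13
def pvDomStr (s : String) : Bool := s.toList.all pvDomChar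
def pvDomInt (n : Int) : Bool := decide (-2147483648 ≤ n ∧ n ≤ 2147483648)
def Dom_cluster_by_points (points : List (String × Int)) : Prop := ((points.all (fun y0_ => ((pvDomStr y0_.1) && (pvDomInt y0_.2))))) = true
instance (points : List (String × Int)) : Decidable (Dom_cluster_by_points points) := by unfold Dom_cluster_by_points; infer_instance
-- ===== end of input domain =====

-- B replaces A's incremental dict-of-lists build with a dedup-then-filter comprehension
-- over the distinct cluster values (objective: simpler; same observable result).

-- ===== PORT A =====
-- A: one pass, maintaining a dict cluster -> list of keys, appending or creating per item.
def cluster_by_points (points : List (String × Int)) : List (Int × List String) :=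
  (points.foldl
    (fun (cl : PySem.Dict Int (List String)) vk =>
      let k2 := vk.2 - PySem.Int.mod vk.2 10
      if cl.contains k2 = false then cl.insert k2 [vk.1]
      else cl.insert k2 (cl.getD k2 [] ++ [vk.1]))
    PySem.Dict.empty).items

-- ===== PORT B =====
-- B: the distinct clusters in first-occurrence order (dict.fromkeys = PySem.List.dedup),
-- each paired with the keys whose value falls in that cluster (a filter pass).
-- The dict comprehension's keys are distinct, so its items list is exactly this map.
def cluster_by_points_alt (points : List (String × Int)) : List (Int × List String) :=
  (PySem.List.dedup (points.map (fun p => p.2 - PySem.Int.mod p.2 10))).map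
    (fun c => (c, (points.filter (fun p => p.2 - PySem.Int.mod p.2 10 == c)).map (·.1)))

-- ===== PRECONDITION & SPEC =====
def Spec_cluster_by_points (points : List (String × Int)) (out : List (Int × List String)) : Prop := out = cluster_by_points_alt points
instance (points : List (String × Int)) (out : List (Int × List String)) : Decidable (Spec_cluster_by_points points out) := by unfold Spec_cluster_by_points; infer_instance

-- ===== CLAIM (what is proved, stated in full; the proofs are below) =====
def Claim_equal_cluster_by_points : Prop := ∀ (points : List (String × Int)), Dom_cluster_by_points points → Spec_cluster_by_points points (cluster_by_points points)

-- ===== LEMMAS AND PROOFS =====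

-- A's loop body is extensionally Dict.modify with default [] and append.
theorem clusterA_step_eq (cl : PySem.Dict Int (List String)) (vk : String × Int) :
    (if cl.contains (vk.2 - PySem.Int.mod vk.2 10) = false
       then cl.insert (vk.2 - PySem.Int.mod vk.2 10) [vk.1]
       else cl.insert (vk.2 - PySem.Int.mod vk.2 10)
              (cl.getD (vk.2 - PySem.Int.mod vk.2 10) [] ++ [vk.1]))
    = cl.modify (vk.2 - PySem.Int.mod vk.2 10) [] (· ++ [vk.1]) := by
  simp only [PySem.Dict.modify]
  by_cases h : cl.contains (vk.2 - PySem.Int.mod vk.2 10) = false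
  · rw [if_pos h, PySem.Dict.getD_of_not_contains cl [] h]
    simp
  · rw [if_neg h]

-- A's fold rewritten as the canonical grouping fold over (cluster, key) pairs.
theorem clusterA_eq_modify_fold (points : List (String × Int)) :
    cluster_by_points points =
      ((points.map (fun p => (p.2 - PySem.Int.mod p.2 10, p.1))).foldl
        (fun (d : PySem.Dict Int (List String)) p => d.modify p.1 [] (· ++ [p.2]))
        PySem.Dict.empty).items := by
  unfold cluster_by_points
  rw [List.foldl_map]
  congr 1
  refine PySem.List.foldl_congr_mem points _ _ _ ?_
  intro cl vk _
  exact clusterA_step_eq cl vk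

-- ===== VERDICT (by name: the statement is the Claim_ definition above) =====
theorem cluster_by_points_spec : Claim_equal_cluster_by_points := by
  intro points _
  unfold Spec_cluster_by_points cluster_by_points_alt
  rw [clusterA_eq_modify_fold]
  set l := points.map (fun p => (p.2 - PySem.Int.mod p.2 10, p.1)) with hl
  set D := l.foldl (fun (d : PySem.Dict Int (List String)) p => d.modify p.1 [] (· ++ [p.2]))
    PySem.Dict.empty with hD
  have hnd : D.keys.Nodup := by
    rw [hD]
    exact PySem.Dict.nodup_keys_foldl_modify_key l Prod.fst [] (fun _ p v => v ++ [p.2])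
      PySem.Dict.empty (by simp)
  have hkeys : D.keys = PySem.List.dedup (points.map (fun p => p.2 - PySem.Int.mod p.2 10)) := by
    rw [hD]
    have h1 := PySem.Dict.keys_foldl_modify_key l Prod.fst ([] : List String)
      (fun _ p v => v ++ [p.2]) PySem.Dict.empty
    rw [h1, PySem.Dict.keys_empty, PySem.Set.update_nil_left, PySem.List.dedup_eq_ofList, hl]
    simp [List.map_map, Function.comp_def]
  have hitems := PySem.Dict.items_eq_map_keys D hnd []
  rw [hitems, hkeys]
  apply List.map_congr_left
  intro c _
  have hgetD : D.getD c [] = (l.filter (fun p => p.1 == c)).map (·.2) := by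
    rw [hD]
    simpa using PySem.Dict.getD_foldl_modify_append l PySem.Dict.empty c
  rw [hgetD, hl]
  simp [List.filter_map, Function.comp_def]
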